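-- pv_equiv track=rewrite | github.com/rafimaliki/IF3211_Huntington-Gene-Checker | src/be/kmp.py | count_max_contiguous_cag_repeats
-- ===== SOURCE A (Python) =====
-- def compute_lps_array(pattern: str) -> list[int]:
--     m = len(pattern)
--     lps = [0] * m
--     length = 0
--     i = 1
--
--     while i < m:
--         if pattern[i] == pattern[length]:
--             length += 1
--             lps[i] = length
--             i += 1
--         else:
--             if length != 0:
--                 length = lps[length - 1]
--             else:
--                 lps[i] = 0
--                 i += 1
--
--     return lps
--
-- def kmp_search(text: str, pattern: str) -> list[int]:
--     n = len(text)
--     m = len(pattern)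
--     if m == 0:
--         return []
--     if n == 0:
--         return []
--
--     lps = compute_lps_array(pattern)
--     occurrences = []
--
--     i = 0
--     j = 0
--
--     while i < n:
--         if pattern[j] == text[i]:
--             i += 1
--             j += 1
--
--         if j == m:
--             occurrences.append(i - j)
--             j = lps[j - 1]
--         elif i < n and pattern[j] != text[i]:
--             if j != 0:
--                 j = lps[j - 1]
--             else:
--                 i += 1
--
--     return occurrences
--
-- def count_max_contiguous_cag_repeats(dna_sequence: str) -> int:
--     dna_sequence = dna_sequence.upper()
--     pattern = "CAG"
--
--     if not dna_sequence or not pattern: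
--         return 0
--
--     cag_occurrences = kmp_search(dna_sequence, pattern)
--
--     if not cag_occurrences:
--         return 0
--
--     max_repeats = 0
--     current_repeats = 0
--
--     if len(cag_occurrences) == 0:
--         return 0
--
--     max_repeats = 1
--     current_repeats = 1
--
--     for i in range(1, len(cag_occurrences)):
--         if cag_occurrences[i] == cag_occurrences[i-1] + len(pattern):
--             current_repeats += 1
--         else:
--             current_repeats = 1
--
--         if current_repeats > max_repeats:
--             max_repeats = current_repeats
--
--     if not cag_occurrences:
--         return 0
--
--     return max_repeats if max_repeats > 0 else 0
-- ===== SOURCE B (Python) =====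
-- def count_max_contiguous_cag_repeats(dna_sequence: str) -> int:
--     s = dna_sequence.upper()
--     n = len(s)
--     best = 0
--     cur = 0
--     i = 0
--     while i < n:
--         if s[i:i+3] == "CAG":
--             cur += 1
--             if cur > best:
--                 best = cur
--             i += 3
--         else:
--             cur = 0
--             i += 1
--     return best
-- ===== Notes on version B (the rewrite author's own statement) =====
-- stated objective: simpler
-- what changed: Replaced the KMP pipeline (LPS table, occurrence-list search, then a second pass counting gap-3 runs over the occurrence list) by a single direct greedy scan that checks the 3-char window at each position, stepping by 3 on a match and by 1 otherwise, tracking the current and best run inline.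
import Mathlib
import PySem

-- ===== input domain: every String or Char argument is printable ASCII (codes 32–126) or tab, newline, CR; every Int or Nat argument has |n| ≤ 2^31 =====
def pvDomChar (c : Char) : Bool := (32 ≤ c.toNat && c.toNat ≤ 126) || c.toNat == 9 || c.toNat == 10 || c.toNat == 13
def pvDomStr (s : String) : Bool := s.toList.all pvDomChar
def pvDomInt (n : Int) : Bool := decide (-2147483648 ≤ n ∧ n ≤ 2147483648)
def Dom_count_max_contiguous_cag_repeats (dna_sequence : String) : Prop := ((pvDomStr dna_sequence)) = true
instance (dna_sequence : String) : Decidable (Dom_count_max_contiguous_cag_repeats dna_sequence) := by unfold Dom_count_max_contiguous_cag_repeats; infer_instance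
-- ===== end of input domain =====

-- B replaces A's KMP pipeline by one direct greedy 3-char-window scan; objective: simpler (same O(n) cost).

-- ===== PORT A =====
-- compute_lps_array's while loop; fuel is only a totality guard (2*m+2 iterations always suffice for
-- the patterns A uses; the entry point only ever calls it with pattern "CAG").
def pv_lpsLoop (pattern : List Char) (m : Nat) : Nat → List Int → Nat → Nat → List Int
  | 0, lps, _, _ => lps
  | fuel + 1, lps, length, i =>
    if i < m then
      if pattern.getD i ' ' = pattern.getD length ' ' then
        pv_lpsLoop pattern m fuel (lps.set i ((length : Int) + 1)) (length + 1) (i + 1)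
      else
        if length ≠ 0 then
          pv_lpsLoop pattern m fuel lps ((lps.getD (length - 1) 0).toNat) i
        else
          pv_lpsLoop pattern m fuel (lps.set i 0) 0 (i + 1)
    else lps

def pv_lps (pattern : List Char) : List Int :=
  pv_lpsLoop pattern pattern.length (2 * pattern.length + 2) (List.replicate pattern.length 0) 0 1

-- kmp_search's while loop; fuel is only a totality guard (with the LPS table of "CAG" each
-- iteration strictly increases 2*i - j, so 2*n + 2 iterations always suffice).
def pv_kmpLoop (text pattern : List Char) (n m : Nat) (lps : List Int) : Nat → Nat → Nat → List Int → List Int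
  | 0, _, _, occ => occ
  | fuel + 1, i, j, occ =>
    if i < n then
      let c := pattern.getD j ' ' = text.getD i ' '
      let i' := if c then i + 1 else i
      let j' := if c then j + 1 else j
      if j' = m then
        pv_kmpLoop text pattern n m lps fuel i' ((lps.getD (j' - 1) 0).toNat) (occ ++ [(i' : Int) - (j' : Int)])
      else if i' < n ∧ pattern.getD j' ' ' ≠ text.getD i' ' ' then
        if j' ≠ 0 then
          pv_kmpLoop text pattern n m lps fuel i' ((lps.getD (j' - 1) 0).toNat) occ
        else
          pv_kmpLoop text pattern n m lps fuel (i' + 1) j' occ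
      else
        pv_kmpLoop text pattern n m lps fuel i' j' occ
    else occ

def pv_kmp_search (text pattern : List Char) : List Int :=
  let n := text.length
  let m := pattern.length
  if m = 0 then []
  else if n = 0 then []
  else pv_kmpLoop text pattern n m (pv_lps pattern) (2 * n + 2) 0 0 []

def count_max_contiguous_cag_repeats (dna_sequence : String) : Int :=
  let t := PySem.Chars.upper dna_sequence.toList
  let pattern := ['C', 'A', 'G']
  if t.isEmpty || pattern.isEmpty then 0
  else
    let occ := pv_kmp_search t pattern
    if occ.isEmpty then 0
    else if occ.length = 0 then 0
    else
      let st :=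
        (PySem.List.pyRange 1 (occ.length : Int) 1).foldl
          (fun (st : Int × Int) idx =>
            let cur := if PySem.List.pyGetD occ idx 0 = PySem.List.pyGetD occ (idx - 1) 0 + (pattern.length : Int) then st.2 + 1 else 1
            let mx := if cur > st.1 then cur else st.1
            (mx, cur))
          (1, 1)
      if occ.isEmpty then 0
      else if st.1 > 0 then st.1 else 0

-- ===== PORT B =====
def pv_bLoop (t : List Char) (n : Nat) (i : Nat) (cur best : Int) : Int :=
  if i < n then
    if PySem.List.slice t (some (i : Int)) (some ((i : Int) + 3)) = ['C', 'A', 'G'] then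
      pv_bLoop t n (i + 3) (cur + 1) (if cur + 1 > best then cur + 1 else best)
    else
      pv_bLoop t n (i + 1) 0 best
  else best
termination_by n - i

def count_max_contiguous_cag_repeats_alt (dna_sequence : String) : Int :=
  let t := PySem.Chars.upper dna_sequence.toList
  pv_bLoop t t.length 0 0 0

-- ===== PRECONDITION & SPEC =====
def Spec_count_max_contiguous_cag_repeats (dna_sequence : String) (out : Int) : Prop := out = count_max_contiguous_cag_repeats_alt dna_sequence
instance (dna_sequence : String) (out : Int) : Decidable (Spec_count_max_contiguous_cag_repeats dna_sequence out) := by unfold Spec_count_max_contiguous_cag_repeats; infer_instance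

-- ===== CLAIM (what is proved, stated in full; the proofs are below) =====
def Claim_equal_count_max_contiguous_cag_repeats : Prop := ∀ (dna_sequence : String), Dom_count_max_contiguous_cag_repeats dna_sequence → Spec_count_max_contiguous_cag_repeats dna_sequence (count_max_contiguous_cag_repeats dna_sequence)

-- ===== LEMMAS AND PROOFS =====

-- The common reference: the list of greedy match positions of "CAG" in t from position i.
def pvMatches (t : List Char) (i : Nat) : List Int :=
  if h : i < t.length then
    if (t.drop i).take 3 = ['C', 'A', 'G'] then (i : Int) :: pvMatches t (i + 3)
    else pvMatches t (i + 1)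
  else []
termination_by t.length - i

-- The common reference run counter: q is the position a continuing match must start at.
def pvRun : List Int → Int → Int → Int → Int
  | [], _, _, best => best
  | p :: L, q, cur, best =>
    let cur' := if p = q then cur + 1 else 1
    pvRun L (p + 3) cur' (if cur' > best then cur' else best)

lemma drop_cons_getD (t : List Char) (i : Nat) (h : i < t.length) :
    t.drop i = t.getD i ' ' :: t.drop (i + 1) := by
  rw [List.drop_eq_getElem_cons h, List.getD_eq_getElem t ' ' h]

lemma pvMatches_ge (t : List Char) (i : Nat) : ∀ p ∈ pvMatches t i, (i : Int) ≤ p := by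
  induction i using pvMatches.induct t with
  | case1 i hlt hc ih =>
    intro p hp
    rw [pvMatches, dif_pos hlt, if_pos hc] at hp
    rcases List.mem_cons.mp hp with rfl | hp
    · exact le_refl _
    · have := ih p hp; omega
  | case2 i hlt hc ih =>
    intro p hp
    rw [pvMatches, dif_pos hlt, if_neg hc] at hp
    have := ih p hp; omega
  | case3 i hlt =>
    intro p hp
    rw [pvMatches, dif_neg hlt] at hp
    simp at hp

lemma pvMatches_step (t : List Char) (i : Nat) (h : i < t.length)
    (hne : (t.drop i).take 3 ≠ ['C', 'A', 'G']) : pvMatches t i = pvMatches t (i + 1) := by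
  rw [pvMatches, dif_pos h, if_neg hne]

lemma pvRun_reset (L : List Int) (q q' cur best : Int) (h : ∀ p, L.head? = some p → p ≠ q) :
    pvRun L q cur best = pvRun L q' 0 best := by
  cases L with
  | nil => rfl
  | cons p L =>
    have hp : p ≠ q := h p rfl
    simp only [pvRun, if_neg hp]
    by_cases hq : p = q' <;> simp [hq]

lemma best_le_pvRun (L : List Int) (q cur best : Int) : best ≤ pvRun L q cur best := by
  induction L generalizing q cur best with
  | nil => exact le_refl _
  | cons p L ih =>
    simp only [pvRun]
    refine le_trans ?_ (ih _ _ _)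
    split <;> omega

lemma slice3 (t : List Char) (i : Nat) :
    PySem.List.slice t (some (i : Int)) (some ((i : Int) + 3)) = (t.drop i).take 3 := by
  have h3 : ((i : Int) + 3) = ((i + 3 : Nat) : Int) := by push_cast; ring
  rw [h3, PySem.List.slice_natCast]
  congr 1
  omega

lemma bLoop_eq_run (t : List Char) : ∀ i cur best,
    pv_bLoop t t.length i cur best = pvRun (pvMatches t i) (i : Int) cur best := by
  intro i cur best
  induction i, cur, best using pv_bLoop.induct t t.length with
  | case1 i cur best hlt hc ih =>
    rw [pv_bLoop, if_pos hlt, if_pos hc, pvMatches, dif_pos hlt, if_pos ((slice3 t i).symm.trans hc)]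
    simp only [pvRun, if_true]
    have h3 : ((i : Int) + 3) = ((i + 3 : Nat) : Int) := by push_cast; ring
    rw [h3]
    simpa using ih
  | case2 i cur best hlt hc ih =>
    rw [pv_bLoop, if_pos hlt, if_neg hc, pvMatches, dif_pos hlt,
        if_neg (fun h => hc ((slice3 t i).trans h)), ih]
    refine (pvRun_reset _ _ _ _ _ ?_).symm
    intro p hp
    have := pvMatches_ge t (i + 1) p (List.mem_of_mem_head? hp)
    omega
  | case3 i cur best hlt =>
    rw [pv_bLoop, if_neg hlt, pvMatches, dif_neg hlt]
    rfl

lemma afold_eq_run (occ : List Int) : ∀ (k s : Nat) (mx cur : Int), occ.length - s = k → 1 ≤ s → s ≤ occ.length →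
    ((PySem.List.pyRange (s : Int) (occ.length : Int) 1).foldl
      (fun (st : Int × Int) idx =>
        let c := if PySem.List.pyGetD occ idx 0 = PySem.List.pyGetD occ (idx - 1) 0 + 3 then st.2 + 1 else 1
        (if c > st.1 then c else st.1, c))
      (mx, cur)).1
    = pvRun (occ.drop s) (occ.getD (s - 1) 0 + 3) cur mx := by
  intro k
  induction k with
  | zero =>
    intro s mx cur hk h1 h2
    have hs : s = occ.length := by omega
    rw [PySem.List.pyRange_one_eq_nil (by omega), List.foldl_nil, hs, List.drop_length]
    rfl
  | succ k ih =>
    intro s mx cur hk h1 h2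
    have hlt : s < occ.length := by omega
    rw [PySem.List.pyRange_one_cons (by exact_mod_cast hlt), List.foldl_cons]
    have hg1 : PySem.List.pyGetD occ (s : Int) 0 = occ[s] := by
      rw [PySem.List.pyGetD_natCast, List.getD_eq_getElem _ _ hlt]
    have hm1 : ((s : Int) - 1) = ((s - 1 : Nat) : Int) := by omega
    have hg2 : PySem.List.pyGetD occ ((s : Int) - 1) 0 = occ.getD (s - 1) 0 := by
      rw [hm1, PySem.List.pyGetD_natCast]
    have hdrop : occ.drop s = occ[s] :: occ.drop (s + 1) := List.drop_eq_getElem_cons hlt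
    have hcast : ((s : Int) + 1) = ((s + 1 : Nat) : Int) := by omega
    rw [hdrop]
    simp only [pvRun, hg1, hg2, hcast]
    by_cases hc : occ[s] = occ.getD (s - 1) 0 + 3
    · simp only [if_pos hc]
      rw [ih (s + 1) _ _ (by omega) (by omega) (by omega), Nat.add_sub_cancel,
          List.getD_eq_getElem _ _ hlt]
    · simp only [if_neg hc]
      rw [ih (s + 1) _ _ (by omega) (by omega) (by omega), Nat.add_sub_cancel,
          List.getD_eq_getElem _ _ hlt]

lemma take3_short (t : List Char) (i : Nat) (h : t.length ≤ i + 2) :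
    (t.drop i).take 3 ≠ ['C', 'A', 'G'] := by
  intro hEq
  have := congrArg List.length hEq
  simp [List.length_take, List.length_drop] at this
  omega

lemma take3_ne1 (t : List Char) (i : Nat) (h : i < t.length) (hC : 'C' ≠ t.getD i ' ') :
    (t.drop i).take 3 ≠ ['C', 'A', 'G'] := by
  rw [drop_cons_getD t i h]
  intro hEq
  rw [List.take_succ_cons] at hEq
  exact hC (List.cons_eq_cons.mp hEq).1.symm

lemma take3_ne2 (t : List Char) (i : Nat) (h : i + 1 < t.length) (hA : 'A' ≠ t.getD (i+1) ' ') :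
    (t.drop i).take 3 ≠ ['C', 'A', 'G'] := by
  rw [drop_cons_getD t i (by omega), drop_cons_getD t (i+1) h]
  intro hEq
  simp only [List.take_succ_cons, List.cons_eq_cons] at hEq
  exact hA hEq.2.1.symm

lemma take3_ne3 (t : List Char) (i : Nat) (h : i + 2 < t.length) (hG : 'G' ≠ t.getD (i+2) ' ') :
    (t.drop i).take 3 ≠ ['C', 'A', 'G'] := by
  rw [drop_cons_getD t i (by omega), drop_cons_getD t (i+1) (by omega), drop_cons_getD t (i+2) h]
  intro hEq
  simp only [List.take_succ_cons, List.cons_eq_cons] at hEq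
  exact hG hEq.2.2.1.symm

lemma take3_eq (t : List Char) (i : Nat) (h : i + 2 < t.length)
    (hC : 'C' = t.getD i ' ') (hA : 'A' = t.getD (i+1) ' ') (hG : 'G' = t.getD (i+2) ' ') :
    (t.drop i).take 3 = ['C', 'A', 'G'] := by
  rw [drop_cons_getD t i (by omega), drop_cons_getD t (i+1) (by omega), drop_cons_getD t (i+2) h]
  simp only [List.take_succ_cons, List.take_zero]
  rw [← hC, ← hA, ← hG]

lemma kmp_eq_matches (t : List Char) : ∀ fuel i occ, 2 * (t.length - i) + 2 ≤ fuel →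
    pv_kmpLoop t ['C', 'A', 'G'] t.length 3 [0, 0, 0] fuel i 0 occ = occ ++ pvMatches t i := by
  intro fuel
  induction fuel using Nat.strong_induction_on with
  | _ fuel IH =>
  intro i occ hf
  obtain ⟨f1, rfl⟩ : ∃ f1, fuel = f1 + 1 := ⟨fuel - 1, by omega⟩
  by_cases hi : i < t.length
  · rw [pv_kmpLoop, if_pos hi]
    by_cases hC : 'C' = t.getD i ' '
    · -- first char matches
      simp only [List.getD_cons_zero, if_pos hC, List.getD_cons_succ]
      rw [if_neg (show ¬((0 + 1 : Nat) = 3) by omega)]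
      by_cases hi1 : i + 1 < t.length
      · by_cases hA : 'A' = t.getD (i + 1) ' '
        · -- second char matches: fall through, unfold a second iteration
          rw [if_neg (fun h => h.2 hA)]
          obtain ⟨f2, rfl⟩ : ∃ f2, f1 = f2 + 1 := ⟨f1 - 1, by omega⟩
          rw [pv_kmpLoop, if_pos hi1]
          simp only [List.getD_cons_zero, List.getD_cons_succ, if_pos hA]
          rw [if_neg (show ¬((0 + 1 + 1 : Nat) = 3) by omega)]
          by_cases hi2 : i + 1 + 1 < t.length
          · by_cases hG : 'G' = t.getD (i + 1 + 1) ' '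
            · -- full match
              rw [if_neg (fun h => h.2 hG)]
              obtain ⟨f3, rfl⟩ : ∃ f3, f2 = f3 + 1 := ⟨f2 - 1, by omega⟩
              rw [pv_kmpLoop, if_pos hi2]
              simp only [List.getD_cons_zero, List.getD_cons_succ, if_pos hG]
              simp only [if_true, Int.toNat_zero]
              rw [IH f3 (by omega) (i + 1 + 1 + 1) _ (by omega)]
              have hval : ((i + 1 + 1 + 1 : Nat) : Int) - ((0 + 1 + 1 + 1 : Nat) : Int) = (i : Int) := by
                push_cast; ring
              rw [hval]
              conv_rhs => rw [pvMatches, dif_pos hi, if_pos (take3_eq t i (by omega) hC hA (by exact hG))]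
              simp [show i + 1 + 1 + 1 = i + 3 from rfl]
            · -- third char mismatch
              rw [if_pos ⟨hi2, hG⟩, if_pos (show ¬((0 + 1 + 1 : Nat) = 0) by omega)]
              simp only [Int.toNat_zero]
              rw [IH f2 (by omega) (i + 1 + 1) occ (by omega)]
              rw [pvMatches_step t i hi (take3_ne3 t i (by omega) hG),
                  pvMatches_step t (i + 1) hi1 (take3_ne1 t (i + 1) hi1 (by rw [← hA]; decide))]
          · -- i+2 = n: partial match 'CA' at the end
            rw [if_neg (fun h => hi2 h.1)]
            obtain ⟨f3, rfl⟩ : ∃ f3, f2 = f3 + 1 := ⟨f2 - 1, by omega⟩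
            rw [pv_kmpLoop, if_neg hi2]
            rw [pvMatches_step t i hi (take3_short t i (by omega)),
                pvMatches_step t (i + 1) hi1 (take3_short t (i + 1) (by omega)),
                pvMatches, dif_neg hi2, List.append_nil]
        · -- second char mismatch
          rw [if_pos ⟨hi1, hA⟩, if_pos (show ¬((0 + 1 : Nat) = 0) by omega)]
          simp only [Nat.add_sub_cancel, List.getD_cons_zero, Int.toNat_zero]
          rw [IH f1 (by omega) (i + 1) occ (by omega)]
          rw [pvMatches_step t i hi (take3_ne2 t i hi1 hA)]
      · -- i+1 = n: partial match 'C' at the end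
        rw [if_neg (fun h => hi1 h.1)]
        obtain ⟨f2, rfl⟩ : ∃ f2, f1 = f2 + 1 := ⟨f1 - 1, by omega⟩
        rw [pv_kmpLoop, if_neg hi1]
        rw [pvMatches_step t i hi (take3_short t i (by omega)),
            pvMatches, dif_neg hi1, List.append_nil]
    · -- first char mismatch: advance i by 1
      simp only [List.getD_cons_zero, if_neg hC]
      have : ¬((0 : Nat) = 3) := by omega
      rw [if_neg this, if_pos ⟨hi, hC⟩, if_neg (by omega)]
      rw [IH f1 (by omega) (i+1) occ (by omega), pvMatches_step t i hi (take3_ne1 t i hi hC)]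
  · rw [pv_kmpLoop, if_neg hi, pvMatches, dif_neg hi, List.append_nil]

lemma lps_cag : pv_lps ['C', 'A', 'G'] = [0, 0, 0] := by decide

-- ===== VERDICT (by name: the statement is the Claim_ definition above) =====
theorem count_max_contiguous_cag_repeats_spec : Claim_equal_count_max_contiguous_cag_repeats := by
  intro s _
  unfold Spec_count_max_contiguous_cag_repeats
  unfold count_max_contiguous_cag_repeats count_max_contiguous_cag_repeats_alt
  set t := PySem.Chars.upper s.toList with ht
  have hB : pv_bLoop t t.length 0 0 0 = pvRun (pvMatches t 0) 0 0 0 := by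
    simpa using bLoop_eq_run t 0 0 0
  by_cases hte : t.isEmpty
  · rw [if_pos (by simp [hte])]
    rw [hB, pvMatches, dif_neg (by simp [List.isEmpty_iff.mp hte])]
    rfl
  · rw [if_neg (by simp [hte])]
    have hocc : pv_kmp_search t ['C', 'A', 'G'] = pvMatches t 0 := by
      unfold pv_kmp_search
      rw [if_neg (by simp), if_neg (by simp [List.isEmpty_iff] at hte; simp [hte]), lps_cag]
      simpa using kmp_eq_matches t (2 * t.length + 2) 0 [] (by omega)
    rw [hocc]
    cases hM : pvMatches t 0 with
    | nil => rw [hB, hM]; rfl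
    | cons p0 rest =>
      rw [if_neg (by simp), if_neg (by simp)]
      simp only [show ((['C', 'A', 'G'].length : Nat) : Int) = 3 by norm_num]
      have haf := afold_eq_run (p0 :: rest) rest.length 1 1 1 (by simp) (le_refl 1) (by simp)
      simp only [show (1 - 1 : Nat) = 0 from rfl, Nat.cast_one, List.drop_succ_cons, List.drop_zero, List.getD_cons_zero] at haf
      rw [hB, hM]
      have hpos := best_le_pvRun rest (p0 + 3) 1 1
      simp only [haf]
      rw [if_neg (by simp), if_pos (by omega)]
      by_cases h0 : p0 = 0
      · simp only [pvRun, h0]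
        norm_num
      · simp only [pvRun, if_neg h0]
        norm_num
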